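-- pv_equiv track=rewrite | github.com/HeoYou/algorithm-python | 프로그래머스 자물쇠와 열쇠.py | lstExtend
-- ===== SOURCE A (Python) =====
-- from collections import deque
--
-- def lstExtend(lst):
--     n = len(lst)
--     lst = deque(lst)
--
--     for i in range(n):
--         lst[i] = deque(lst[i])
--
--     for i in range(n):
--         for j in range(n - 1):
--             lst[i].appendleft(0)
--             lst[i].append(0)
--
--     for i in range(n - 1):
--         lst.appendleft([0] * (n + ((n - 1) * 2)))
--         lst.append([0] * (n + ((n - 1) * 2)) )
--
--     for i in range(len(lst)):
--         lst[i] = list(lst[i])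
--
--     return list(lst)
-- ===== SOURCE B (Python) =====
-- def lstExtend(lst):
--     n = len(lst)
--     pad = [0] * (n - 1)
--     zrow = [0] * (3 * n - 2)
--     return [zrow[:] for _ in range(n - 1)] \
--          + [pad + row + pad for row in lst] \
--          + [zrow[:] for _ in range(n - 1)]
-- ===== Notes on version B (the rewrite author's own statement) =====
-- stated objective: simpler
-- what changed: Replaces the four deque-mutation loops (per-index appendleft/append growth) with a direct construction: zero border rows plus a comprehension that concatenates the padding onto each row.
import Mathlib
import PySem

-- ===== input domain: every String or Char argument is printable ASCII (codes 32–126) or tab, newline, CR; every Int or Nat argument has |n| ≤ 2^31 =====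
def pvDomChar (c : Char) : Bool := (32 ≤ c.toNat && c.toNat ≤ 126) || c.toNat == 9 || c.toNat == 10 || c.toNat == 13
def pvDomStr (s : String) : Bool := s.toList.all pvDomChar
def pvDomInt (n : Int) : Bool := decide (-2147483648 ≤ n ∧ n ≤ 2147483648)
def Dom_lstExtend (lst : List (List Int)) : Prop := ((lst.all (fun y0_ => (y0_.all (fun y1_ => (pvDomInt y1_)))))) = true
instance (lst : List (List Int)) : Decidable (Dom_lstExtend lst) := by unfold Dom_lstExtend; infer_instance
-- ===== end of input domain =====

-- B replaces A's four deque-mutation loops by a direct construction (border rows + per-row concatenation); simpler, same cost.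

-- ===== PORT A =====
-- deque(lst) / deque(lst[i]) / list(lst[i]) conversions are identity in the List model,
-- so only the two mutating loops remain; in-place index assignment is List.set.
def lstExtend (lst : List (List Int)) : List (List Int) :=
  let n := lst.length
  -- for i in range(n): for j in range(n-1): lst[i].appendleft(0); lst[i].append(0)
  let s1 := (List.range n).foldl
    (fun acc i =>
      acc.set i ((List.range (n - 1)).foldl (fun r _ => 0 :: (r ++ [0])) (acc.getD i [])))
    lst
  -- for i in range(n-1): lst.appendleft([0]*(n+(n-1)*2)); lst.append([0]*(n+(n-1)*2))
  let zrow : List Int := List.replicate (n + (n - 1) * 2) 0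
  (List.range (n - 1)).foldl (fun acc _ => zrow :: (acc ++ [zrow])) s1

-- ===== PORT B =====
def lstExtend_alt (lst : List (List Int)) : List (List Int) :=
  let n := lst.length
  let pad : List Int := List.replicate (n - 1) 0
  let zrow : List Int := List.replicate (3 * n - 2) 0
  List.replicate (n - 1) zrow ++ lst.map (fun row => pad ++ row ++ pad)
    ++ List.replicate (n - 1) zrow

-- ===== PRECONDITION & SPEC =====
def Spec_lstExtend (lst : List (List Int)) (out : List (List Int)) : Prop := out = lstExtend_alt lst
instance (lst : List (List Int)) (out : List (List Int)) : Decidable (Spec_lstExtend lst out) := by unfold Spec_lstExtend; infer_instance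

-- ===== CLAIM (what is proved, stated in full; the proofs are below) =====
def Claim_equal_lstExtend : Prop := ∀ (lst : List (List Int)), Dom_lstExtend lst → Spec_lstExtend lst (lstExtend lst)

-- ===== LEMMAS AND PROOFS =====

-- the prepend/append loop (on either element type) equals surrounding with replicates
theorem pv_wrap_loop {α : Type} (z : α) :
    ∀ (k : Nat) (s : List α),
      (List.range k).foldl (fun acc _ => z :: (acc ++ [z])) s
        = List.replicate k z ++ s ++ List.replicate k z := by
  intro k
  induction k with
  | zero => intro s; simp
  | succ k ih =>
    intro s
    rw [List.range_succ, List.foldl_append, ih]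
    simp [List.replicate_succ, ← List.replicate_succ']

-- the index-update loop over range m rewrites the first m elements through g
theorem pv_set_map_loop (g : List Int → List Int) :
    ∀ (m : Nat) (l : List (List Int)),
      (List.range m).foldl (fun acc i => acc.set i (g (acc.getD i []))) l
        = (l.take m).map g ++ l.drop m := by
  intro m
  induction m with
  | zero => intro l; simp
  | succ m ih =>
    intro l
    rw [List.range_succ, List.foldl_append, List.foldl_cons, List.foldl_nil, ih]
    by_cases h : m < l.length
    · have hlen : ((l.take m).map g).length = m := by
        simp [Nat.min_eq_left (Nat.le_of_lt h)]
      rw [List.drop_eq_getElem_cons h]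
      have hmin : min m l.length = m := Nat.min_eq_left (Nat.le_of_lt h)
      have hget : ((l.take m).map g ++ l[m] :: l.drop (m + 1)).getD m [] = l[m] := by
        simp [List.getD, List.getElem?_append_right, hlen, hmin, List.getElem?_eq_getElem h]
      rw [hget]
      have hset : ((l.take m).map g ++ l[m] :: l.drop (m + 1)).set m (g l[m])
          = (l.take m).map g ++ g l[m] :: l.drop (m + 1) := by
        rw [List.set_append]
        simp [hlen, hmin]
        rw [List.drop_eq_getElem_cons h, List.set_cons_zero]
      have htake : l.take (m + 1) = l.take m ++ [l[m]] := by
        rw [List.take_add_one, List.getElem?_eq_getElem h]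
        rfl
      have hmap : List.map g (l.take (m + 1)) = List.map g (l.take m) ++ [g l[m]] := by
        rw [htake, List.map_append]
        rfl
      rw [hset, hmap, List.append_assoc]
      rfl
    · have hle : l.length ≤ m := Nat.le_of_not_lt h
      have ht : l.take m = l := List.take_of_length_le hle
      have ht' : l.take (m + 1) = l := List.take_of_length_le (Nat.le_succ_of_le hle)
      have hd : l.drop m = [] := List.drop_eq_nil_of_le hle
      have hd' : l.drop (m + 1) = [] := List.drop_eq_nil_of_le (Nat.le_succ_of_le hle)
      rw [ht, ht', hd, hd']
      apply List.set_eq_of_length_le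
      simpa using hle

-- ===== VERDICT (by name: the statement is the Claim_ definition above) =====
theorem lstExtend_spec : Claim_equal_lstExtend := by
  intro lst _
  unfold Spec_lstExtend
  show lstExtend lst = lstExtend_alt lst
  simp only [lstExtend, lstExtend_alt]
  rw [pv_wrap_loop,
    pv_set_map_loop (fun r0 => (List.range (lst.length - 1)).foldl (fun r _ => 0 :: (r ++ [0])) r0)
      lst.length lst]
  have hz : lst.length + (lst.length - 1) * 2 = 3 * lst.length - 2 := by omega
  simp only [List.take_length, List.drop_length, List.append_nil, hz]
  congr 1
  · congr 1
    apply List.map_congr_left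
    intro row _
    rw [pv_wrap_loop]
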